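-- pv_equiv track=rewrite | github.com/guinness76/pi-eink-calendar | program/main.py | maybeSplitEventSummary
-- ===== SOURCE A (Python) =====
-- eventCharLimit = 26
--
-- def maybeSplitEventSummary(eventSummary):
--     parts = eventSummary.split()
--
--     truncatedMsg = ""
--     truncatedMsg2 = ""
--     useTruncated2 = False
--
--     for word in parts:
--         if (len(truncatedMsg) + len(word) + 1) > eventCharLimit:
--             useTruncated2 = True
--
--         if useTruncated2:
--             truncatedMsg2 += f"{word} "
--         else:
--             truncatedMsg += f"{word} "
--
--     truncatedMsg = truncatedMsg.strip()
--     truncatedMsg2 = truncatedMsg2.strip()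
--
--     return [truncatedMsg, truncatedMsg2]
-- ===== SOURCE B (Python) =====
-- eventCharLimit = 26
--
-- def maybeSplitEventSummary(eventSummary):
--     parts = eventSummary.split()
--     i = len(parts)
--     runLen = 0
--     for j, word in enumerate(parts):
--         if runLen + len(word) + 1 > eventCharLimit:
--             i = j
--             break
--         runLen += len(word) + 1
--     return [' '.join(parts[:i]), ' '.join(parts[i:])]
-- ===== Notes on version B (the rewrite author's own statement) =====
-- stated objective: simpler
-- what changed: Replaces A's two-buffer accumulation loop with a sticky flag by a single pass that finds the split index via a running length, then returns the two slices each joined with single spaces.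
import Mathlib
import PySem

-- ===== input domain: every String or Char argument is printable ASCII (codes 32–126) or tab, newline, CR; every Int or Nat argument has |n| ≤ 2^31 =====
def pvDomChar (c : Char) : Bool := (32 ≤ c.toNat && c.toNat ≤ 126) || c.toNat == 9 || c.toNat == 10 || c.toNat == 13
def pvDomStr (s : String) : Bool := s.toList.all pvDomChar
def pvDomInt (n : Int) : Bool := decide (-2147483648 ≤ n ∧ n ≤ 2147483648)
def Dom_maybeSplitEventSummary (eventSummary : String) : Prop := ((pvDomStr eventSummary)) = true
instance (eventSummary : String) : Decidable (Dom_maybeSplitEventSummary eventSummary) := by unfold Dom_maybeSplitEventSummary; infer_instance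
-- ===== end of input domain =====

-- B replaces A's two-buffer/sticky-flag string-accumulation loop by one pass that finds the
-- split index, then joins the two slices (objective: simpler decomposition; same results).
-- String concatenation and len() are ported exactly on List Char via PySem.Chars.

-- ===== PORT A =====
-- the loop body: state = (truncatedMsg, truncatedMsg2, useTruncated2), words as List Char
def pvStepA (st : List Char × List Char × Bool) (w : List Char) :
    List Char × List Char × Bool :=
  let use2 := st.2.2 || decide (st.1.length + w.length + 1 > 26)
  if use2 then (st.1, st.2.1 ++ (w ++ [' ']), use2)
  else (st.1 ++ (w ++ [' ']), st.2.1, use2)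

def maybeSplitEventSummary (eventSummary : String) : List String :=
  let parts := PySem.Chars.split₀ eventSummary.toList
  let r := parts.foldl pvStepA ([], [], false)
  [String.ofList (PySem.Chars.strip r.1), String.ofList (PySem.Chars.strip r.2.1)]

-- ===== PORT B =====
-- the index-finding loop of Source B: first j with runLen + len(word) + 1 > 26, else len(parts)
def pvSplitIdx (runLen : Nat) : List (List Char) → Nat
  | [] => 0
  | w :: rest =>
      if runLen + w.length + 1 > 26 then 0
      else pvSplitIdx (runLen + w.length + 1) rest + 1

def maybeSplitEventSummary_alt (eventSummary : String) : List String :=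
  let parts := PySem.Chars.split₀ eventSummary.toList
  let i := pvSplitIdx 0 parts
  [String.ofList (PySem.Chars.join [' '] (parts.take i)),
   String.ofList (PySem.Chars.join [' '] (parts.drop i))]

-- ===== PRECONDITION & SPEC =====
def Spec_maybeSplitEventSummary (eventSummary : String) (out : List String) : Prop := out = maybeSplitEventSummary_alt eventSummary
instance (eventSummary : String) (out : List String) : Decidable (Spec_maybeSplitEventSummary eventSummary out) := by unfold Spec_maybeSplitEventSummary; infer_instance

-- ===== CLAIM (what is proved, stated in full; the proofs are below) =====
def Claim_equal_maybeSplitEventSummary : Prop := ∀ (eventSummary : String), Dom_maybeSplitEventSummary eventSummary → Spec_maybeSplitEventSummary eventSummary (maybeSplitEventSummary eventSummary)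

-- ===== LEMMAS AND PROOFS =====

-- a word produced by split(): nonempty, no whitespace characters
def pvGood (w : List Char) : Prop := w ≠ [] ∧ ∀ c ∈ w, PySem.Chars.isspace c = false

-- what A's accumulators hold: each word followed by one space
def pvRend (ws : List (List Char)) : List Char := ws.flatMap (fun w => w ++ [' '])

theorem pvRend_nil : pvRend [] = [] := rfl

theorem pvRend_cons (w : List Char) (ws : List (List Char)) :
    pvRend (w :: ws) = w ++ [' '] ++ pvRend ws := by
  simp [pvRend]

theorem pvRend_eq : ∀ (rest : List (List Char)) (w : List Char),
    pvRend (w :: rest) = PySem.Chars.join [' '] (w :: rest) ++ [' '] := by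
  intro rest
  induction rest with
  | nil => intro w; simp [pvRend_cons, pvRend_nil, PySem.Chars.join_singleton]
  | cons w' r ih =>
      intro w
      rw [pvRend_cons, ih w', PySem.Chars.join_cons_cons]
      simp

theorem split₀_go_good : ∀ (s cur : List Char) (acc : List (List Char)),
    (∀ c ∈ cur, PySem.Chars.isspace c = false) → (∀ w ∈ acc, pvGood w) →
    ∀ w ∈ PySem.Chars.split₀.go s cur acc, pvGood w := by
  intro s
  induction s with
  | nil =>
      intro cur acc hcur hacc w hw
      rw [PySem.Chars.split₀.go.eq_def] at hw
      by_cases hc : cur.isEmpty = true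
      · simp [hc] at hw; exact hacc w hw
      · simp [hc] at hw
        rcases hw with h | h
        · exact hacc w h
        · subst h
          refine ⟨by simpa [List.isEmpty_iff] using hc, ?_⟩
          intro c hc'; exact hcur c (List.mem_reverse.mp hc')
  | cons c rest ih =>
      intro cur acc hcur hacc w hw
      rw [PySem.Chars.split₀.go.eq_def] at hw
      by_cases hs : PySem.Chars.isspace c = true
      · by_cases hc : cur.isEmpty = true
        · simp [hs, hc] at hw
          exact ih [] acc (by simp) hacc w hw
        · simp [hs, hc] at hw
          refine ih [] (cur.reverse :: acc) (by simp) ?_ w hw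
          intro v hv
          rcases List.mem_cons.mp hv with hv | hv
          · subst hv
            exact ⟨by simpa [List.isEmpty_iff] using hc,
              fun d hd => hcur d (List.mem_reverse.mp hd)⟩
          · exact hacc v hv
      · simp [hs] at hw
        refine ih (c :: cur) acc ?_ hacc w hw
        intro d hd
        rcases List.mem_cons.mp hd with hd | hd
        · subst hd; simpa using hs
        · exact hcur d hd

theorem split₀_good (s : List Char) : ∀ w ∈ PySem.Chars.split₀ s, pvGood w :=
  split₀_go_good s [] [] (by simp) (by simp)

-- A's loop once the flag is set
theorem foldA_true : ∀ (ws : List (List Char)) (t1 t2 : List Char),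
    ws.foldl pvStepA (t1, t2, true) = (t1, t2 ++ pvRend ws, true) := by
  intro ws
  induction ws with
  | nil => intro t1 t2; simp [pvRend]
  | cons w rest ih =>
      intro t1 t2
      have hstep : pvStepA (t1, t2, true) w = (t1, t2 ++ (w ++ [' ']), true) := by
        simp [pvStepA]
      rw [List.foldl_cons, hstep, ih, pvRend_cons]
      simp

-- A's loop before the flag is set, characterised by B's split index
theorem foldA_false : ∀ (ws : List (List Char)) (t1 : List Char),
    ws.foldl pvStepA (t1, [], false) =
      (t1 ++ pvRend (ws.take (pvSplitIdx t1.length ws)),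
       pvRend (ws.drop (pvSplitIdx t1.length ws)),
       decide (pvSplitIdx t1.length ws < ws.length)) := by
  intro ws
  induction ws with
  | nil => intro t1; simp [pvSplitIdx, pvRend]
  | cons w rest ih =>
      intro t1
      by_cases h : t1.length + w.length + 1 > 26
      · have hstep : pvStepA (t1, [], false) w = (t1, w ++ [' '], true) := by
          simp [pvStepA, h]
        rw [List.foldl_cons, hstep, foldA_true]
        simp [pvSplitIdx, h, pvRend_cons, pvRend_nil]
      · have hstep : pvStepA (t1, [], false) w = (t1 ++ (w ++ [' ']), [], false) := by
          simp [pvStepA, h]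
        rw [List.foldl_cons, hstep, ih (t1 ++ (w ++ [' ']))]
        have hlen : (t1 ++ (w ++ [' '])).length = t1.length + w.length + 1 := by
          simp; omega
        rw [hlen]
        simp only [pvSplitIdx, if_neg (by omega : ¬ t1.length + w.length + 1 > 26)]
        simp only [List.take_succ_cons, List.drop_succ_cons, pvRend_cons,
          List.length_cons, List.append_assoc, Prod.mk.injEq]
        exact ⟨trivial, trivial, decide_eq_decide.mpr (by omega)⟩

theorem dropWhile_of_all_false {p : Char → Bool} : ∀ (l : List Char),
    (∀ c ∈ l, p c = false) → List.dropWhile p l = l := by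
  intro l h
  cases l with
  | nil => rfl
  | cons c t => simp [h c (by simp)]

theorem lstrip_good (w t : List Char) (hw : pvGood w) :
    PySem.Chars.lstrip (w ++ t) = w ++ t := by
  obtain ⟨hne, hns⟩ := hw
  cases w with
  | nil => exact absurd rfl hne
  | cons c w' =>
      simp only [PySem.Chars.lstrip, List.cons_append, List.dropWhile_cons]
      rw [hns c (by simp)]
      simp

theorem rstrip_append_space (x : List Char) :
    PySem.Chars.rstrip (x ++ [' ']) = PySem.Chars.rstrip x := by
  simp [PySem.Chars.rstrip, (by decide : PySem.Chars.isspace ' ' = true)]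

theorem rstrip_append_good (t w : List Char) (hw : pvGood w)
    (hrec : PySem.Chars.rstrip w = w) :
    PySem.Chars.rstrip (t ++ w) = t ++ w := by
  obtain ⟨hne, _⟩ := hw
  have hrev : w.reverse ≠ [] := by simpa using hne
  cases hr : w.reverse with
  | nil => exact absurd hr hrev
  | cons c l =>
      have hpc : PySem.Chars.isspace c = false := by
        by_contra hpc
        have hpc' : PySem.Chars.isspace c = true := by
          cases h' : PySem.Chars.isspace c
          · exact absurd h' hpc
          · rfl
        have := hrec
        simp only [PySem.Chars.rstrip, hr, List.dropWhile_cons, hpc', if_pos] at this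
        have hlen := congrArg List.length this
        have hd := List.length_dropWhile_le PySem.Chars.isspace l
        have : w.length = w.reverse.length := (List.length_reverse (as := w)).symm
        simp [hr] at this hlen
        omega
      simp only [PySem.Chars.rstrip, List.reverse_append, hr, List.cons_append,
        List.dropWhile_cons, hpc]
      have hw' := congrArg List.reverse hr
      simp only [List.reverse_reverse, List.reverse_cons] at hw'
      simp [hw'.symm]

theorem rstrip_join_good : ∀ (ws : List (List Char)), (∀ w ∈ ws, pvGood w) →
    PySem.Chars.rstrip (PySem.Chars.join [' '] ws) = PySem.Chars.join [' '] ws := by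
  intro ws
  induction ws with
  | nil => intro _; simp [PySem.Chars.join_nil]; rfl
  | cons w rest ih =>
      intro h
      cases rest with
      | nil =>
          rw [PySem.Chars.join_singleton]
          have hw := h w (by simp)
          have := rstrip_append_good [] w hw
          simp only [List.nil_append] at this
          -- bootstrap: rstrip w = w since all chars of w are non-space
          have hall : PySem.Chars.rstrip w = w := by
            simp only [PySem.Chars.rstrip]
            rw [dropWhile_of_all_false w.reverse
              (fun c hc => hw.2 c (List.mem_reverse.mp hc))]
            simp
          exact hall
      | cons w' rest' =>
          rw [PySem.Chars.join_cons_cons]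
          have hrest : ∀ v ∈ (w' :: rest'), pvGood v := fun v hv => h v (by simp [hv])
          have hjoin_ne : PySem.Chars.join [' '] (w' :: rest') ≠ [] := by
            cases rest' with
            | nil => rw [PySem.Chars.join_singleton]; exact (hrest w' (by simp)).1
            | cons w'' r'' =>
                rw [PySem.Chars.join_cons_cons]
                have := (hrest w' (by simp)).1
                simp [this]
          -- last char of join (w'::rest') is non-space: prove via rstrip fixpoint + goodness of shape
          have hir := ih hrest
          -- rstrip ((w ++ [' ']) ++ join rest) = _ using that join rest is rstrip-fixed and nonempty
          have : PySem.Chars.rstrip ((w ++ [' ']) ++ PySem.Chars.join [' '] (w' :: rest')) =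
              (w ++ [' ']) ++ PySem.Chars.join [' '] (w' :: rest') := by
            -- need pvGood-like property only for nonemptiness + rstrip-fixed: reuse rstrip_append_good
            -- rstrip_append_good needs pvGood of the suffix; join may contain spaces, so argue directly
            obtain ⟨c, l, hr⟩ : ∃ c l, (PySem.Chars.join [' '] (w' :: rest')).reverse = c :: l := by
              cases hj : (PySem.Chars.join [' '] (w' :: rest')).reverse with
              | nil => exact absurd (by simpa using hj) hjoin_ne
              | cons c l => exact ⟨c, l, rfl⟩
            have hpc : PySem.Chars.isspace c = false := by
              by_contra hpc
              have hpc' : PySem.Chars.isspace c = true := by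
                cases h' : PySem.Chars.isspace c
                · exact absurd h' hpc
                · rfl
              have := hir
              simp only [PySem.Chars.rstrip, hr, List.dropWhile_cons, hpc', if_pos] at this
              have hlen := congrArg List.length this
              have hd := List.length_dropWhile_le PySem.Chars.isspace l
              have hL : (PySem.Chars.join [' '] (w' :: rest')).length =
                  (PySem.Chars.join [' '] (w' :: rest')).reverse.length :=
                (List.length_reverse (as := PySem.Chars.join [' '] (w' :: rest'))).symm
              simp [hr] at hL hlen
              omega
            simp only [PySem.Chars.rstrip, List.reverse_append, hr, List.cons_append,
              List.dropWhile_cons, hpc]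
            have hw' := congrArg List.reverse hr
            simp only [List.reverse_reverse, List.reverse_cons] at hw'
            simp [hw'.symm]
          simpa [List.append_assoc] using this

-- the central rewrite: strip of A's word-space accumulation is the space-join
theorem strip_rend (ws : List (List Char)) (h : ∀ w ∈ ws, pvGood w) :
    PySem.Chars.strip (pvRend ws) = PySem.Chars.join [' '] ws := by
  cases ws with
  | nil => simp [pvRend, PySem.Chars.join_nil]; rfl
  | cons w rest =>
      rw [pvRend_eq rest w, PySem.Chars.strip]
      have hw := h w (by simp)
      have hlj : ∃ t, PySem.Chars.join [' '] (w :: rest) = w ++ t := by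
        cases rest with
        | nil => exact ⟨[], by rw [PySem.Chars.join_singleton]; simp⟩
        | cons w' r =>
            exact ⟨' ' :: PySem.Chars.join [' '] (w' :: r),
              by rw [PySem.Chars.join_cons_cons]; simp⟩
      obtain ⟨t, ht⟩ := hlj
      rw [ht, List.append_assoc, lstrip_good w (t ++ [' ']) hw, ← List.append_assoc, ← ht,
        rstrip_append_space, rstrip_join_good (w :: rest) h]

-- ===== VERDICT (by name: the statement is the Claim_ definition above) =====
theorem maybeSplitEventSummary_spec : Claim_equal_maybeSplitEventSummary := by
  intro s _
  unfold Spec_maybeSplitEventSummary maybeSplitEventSummary maybeSplitEventSummary_alt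
  simp only []
  set parts := PySem.Chars.split₀ s.toList with hparts
  have hfold := foldA_false parts []
  simp only [List.length_nil] at hfold
  have hgood := split₀_good s.toList
  have hgt : ∀ w ∈ parts.take (pvSplitIdx 0 parts), pvGood w :=
    fun w hw => hgood w (List.mem_of_mem_take hw)
  have hgd : ∀ w ∈ parts.drop (pvSplitIdx 0 parts), pvGood w :=
    fun w hw => hgood w (List.mem_of_mem_drop hw)
  rw [hfold]
  simp [strip_rend _ hgt, strip_rend _ hgd]
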